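-- pv_equiv track=rewrite | github.com/pypi-data/pypi-mirror-271 | packages/psyke/psyke-0.8.6.dev2.tar.gz/psyke-0.8.6.dev2/psyke/extraction/cart/__init__.py | _simplify_nodes
-- ===== SOURCE A (Python) =====
-- from typing import Iterable
--
-- def _simplify_nodes(nodes: list) -> Iterable:
--     simplified = [nodes.pop(0)]
--     while len(nodes) > 0:
--         first_node = nodes[0][0]
--         for condition in first_node:
--             if all([condition in [node[0] for node in nodes][i] for i in range(len(nodes))]):
--                 [node[0].remove(condition) for node in nodes]
--         simplified.append(nodes.pop(0))
--     return simplified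
-- ===== SOURCE B (Python) =====
-- from typing import Iterable
--
-- # One global presence dict (condition -> number of remaining nodes containing it) replaces
-- # A's per-condition rebuild of all remaining condition lists; like A, it empties the input
-- # list and removes the shared conditions from the inner lists in place.
-- def _simplify_nodes(nodes: list) -> Iterable:
--     simplified = [nodes.pop(0)]
--     presence = {}
--     for node in nodes:
--         seen = set()
--         for c in node[0]:
--             if c not in seen:
--                 seen.add(c)
--                 presence[c] = presence.get(c, 0) + 1
--     remaining = list(nodes)
--     del nodes[:]
--     while remaining:
--         node = remaining[0]
--         conds = node[0]
--         i = 0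
--         while i < len(conds):
--             c = conds[i]
--             if presence.get(c, 0) == len(remaining):
--                 for nd in remaining:
--                     nd[0].remove(c)
--                     if c not in nd[0]:
--                         presence[c] -= 1
--             i += 1
--         done = set()
--         for c in conds:
--             if c not in done:
--                 done.add(c)
--                 presence[c] -= 1
--         simplified.append(node)
--         remaining.pop(0)
--     return simplified
-- ===== Notes on version B (the rewrite author's own statement) =====
-- stated objective: faster
-- what changed: Instead of rebuilding the list of all remaining condition lists for every condition of every node (A's all([condition in [node[0] for node in nodes][i] ...])), B maintains one dict counting, per condition, how many remaining nodes contain it, so the 'common to all remaining nodes' test is a single O(1) lookup; the mutate-during-iteration skip is replicated by an explicit index loop.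
import Mathlib
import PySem

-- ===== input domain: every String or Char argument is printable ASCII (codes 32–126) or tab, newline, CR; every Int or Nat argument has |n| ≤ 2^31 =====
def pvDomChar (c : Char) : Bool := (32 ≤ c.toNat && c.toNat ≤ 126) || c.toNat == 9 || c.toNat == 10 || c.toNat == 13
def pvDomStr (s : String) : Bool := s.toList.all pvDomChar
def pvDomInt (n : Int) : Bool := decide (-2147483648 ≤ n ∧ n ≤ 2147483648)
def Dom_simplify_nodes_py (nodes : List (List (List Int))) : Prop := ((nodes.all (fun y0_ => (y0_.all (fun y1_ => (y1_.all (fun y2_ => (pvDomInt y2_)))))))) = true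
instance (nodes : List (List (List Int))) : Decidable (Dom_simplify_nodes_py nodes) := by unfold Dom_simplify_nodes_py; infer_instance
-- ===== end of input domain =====

-- B replaces A's per-condition rebuild of all remaining condition lists by one dict counting, per
-- condition, the number of remaining nodes containing it (O(1) membership-in-all test); return-value
-- equivalence (both Pythons also empty the input list and mutate the inner lists in place alike).


-- ===== PORT A =====
-- node[0].remove(condition): first-occurrence removal (both programs call it only when the
-- guard guarantees membership, so the getD miss-default is unreachable there)
def pvRemoveCond (c : Int) (nd : List (List Int)) : List (List Int) :=
  match nd with
  | [] => []
  | conds :: t => ((PySem.List.remove? conds c).getD conds) :: t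

-- all([condition in [node[0] for node in nodes][i] for i in range(len(nodes))]);
-- heads is the comprehension [node[0] for node in nodes]
def pvAllContain (c : Int) (heads : List (List Int)) : Bool :=
  (List.range heads.length).all (fun i => (heads.getD i []).contains c)

-- the `for condition in first_node` loop: CPython iterates the live list by index i;
-- state: conds = nodes[0][0] (mutated in place by remove), rest = nodes[1:].  fuel is only a
-- structural-termination guard: the loop runs at most conds.length more steps (length never
-- grows), so the initial fuel conds.length is never exhausted.
def pvInnerA : Nat → Nat → List Int → List (List (List Int)) →
    List Int × List (List (List Int))
  | 0, _, conds, rest => (conds, rest)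
  | fuel + 1, i, conds, rest =>
    if h : i < conds.length then
      if pvAllContain conds[i] (conds :: rest.map (fun nd => nd.headD [])) then
        pvInnerA fuel (i + 1) ((PySem.List.remove? conds conds[i]).getD conds)
          (rest.map (pvRemoveCond conds[i]))
      else pvInnerA fuel (i + 1) conds rest
    else (conds, rest)

-- the `while len(nodes) > 0` loop: process nodes[0][0], then pop nodes[0] into the output
-- (fuel = number of remaining nodes, which the condition loop preserves)
def pvOuterA : Nat → List (List (List Int)) → List (List (List Int))
  | 0, _ => []
  | _ + 1, [] => []
  | fuel + 1, nd :: rest =>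
    ((pvInnerA (nd.headD []).length 0 (nd.headD []) rest).1 :: nd.tail) ::
      pvOuterA fuel (pvInnerA (nd.headD []).length 0 (nd.headD []) rest).2

-- simplified = [nodes.pop(0)] then the while loop ([] is excluded by Pre_: pop from empty raises)
def simplify_nodes_py (nodes : List (List (List Int))) : List (List (List Int)) :=
  match nodes with
  | [] => []
  | nd :: rest => nd :: pvOuterA rest.length rest

-- ===== PORT B =====
-- for c in conds: if c not in seen: seen.add(c); presence[c] = presence.get(c, 0) + 1
def pvAddGo (p : PySem.Dict Int Int) (seen : PySem.Set Int) : List Int → PySem.Dict Int Int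
  | [] => p
  | c :: cs =>
    if PySem.Set.contains seen c then pvAddGo p seen cs
    else pvAddGo (p.insert c (p.getD c 0 + 1)) (PySem.Set.add seen c) cs

-- for c in conds: if c not in done: done.add(c); presence[c] -= 1  (key present under B's invariant)
def pvDecGo (p : PySem.Dict Int Int) (seen : PySem.Set Int) : List Int → PySem.Dict Int Int
  | [] => p
  | c :: cs =>
    if PySem.Set.contains seen c then pvDecGo p seen cs
    else pvDecGo (p.insert c (p.getD c 0 - 1)) (PySem.Set.add seen c) cs

-- for nd in remaining: nd[0].remove(c); if c not in nd[0]: presence[c] -= 1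
def pvFire (c : Int) (p : PySem.Dict Int Int) :
    List (List (List Int)) → List (List (List Int)) × PySem.Dict Int Int
  | [] => ([], p)
  | nd :: t =>
    (pvRemoveCond c nd ::
      (pvFire c (if ((pvRemoveCond c nd).headD []).contains c then p
                 else p.insert c (p.getD c 0 - 1)) t).1,
     (pvFire c (if ((pvRemoveCond c nd).headD []).contains c then p
                else p.insert c (p.getD c 0 - 1)) t).2)

-- B's inner index loop: the O(1) presence test replaces A's all(...); the head node of
-- `remaining` (= conds) is the first iteration of the removal loop, then pvFire does the rest.
-- fuel is the same structural-termination guard as in the port of A.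
def pvInnerB : Nat → Nat → List Int → List (List (List Int)) → PySem.Dict Int Int →
    List Int × List (List (List Int)) × PySem.Dict Int Int
  | 0, _, conds, rest, p => (conds, rest, p)
  | fuel + 1, i, conds, rest, p =>
    if h : i < conds.length then
      if p.getD conds[i] 0 = (rest.length : Int) + 1 then
        pvInnerB fuel (i + 1) ((PySem.List.remove? conds conds[i]).getD conds)
          (pvFire conds[i]
            (if ((PySem.List.remove? conds conds[i]).getD conds).contains conds[i] then p
             else p.insert conds[i] (p.getD conds[i] 0 - 1)) rest).1
          (pvFire conds[i]
            (if ((PySem.List.remove? conds conds[i]).getD conds).contains conds[i] then p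
             else p.insert conds[i] (p.getD conds[i] 0 - 1)) rest).2
      else pvInnerB fuel (i + 1) conds rest p
    else (conds, rest, p)

-- B's while loop over `remaining`
def pvOuterB : Nat → List (List (List Int)) → PySem.Dict Int Int → List (List (List Int))
  | 0, _, _ => []
  | _ + 1, [], _ => []
  | fuel + 1, nd :: rest, p =>
    ((pvInnerB (nd.headD []).length 0 (nd.headD []) rest p).1 :: nd.tail) ::
      pvOuterB fuel (pvInnerB (nd.headD []).length 0 (nd.headD []) rest p).2.1
        (pvDecGo (pvInnerB (nd.headD []).length 0 (nd.headD []) rest p).2.2 PySem.Set.empty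
          (pvInnerB (nd.headD []).length 0 (nd.headD []) rest p).1)

def simplify_nodes_py_alt (nodes : List (List (List Int))) : List (List (List Int)) :=
  match nodes with
  | [] => []
  | nd :: rest =>
    nd :: pvOuterB rest.length rest
      (rest.foldl (fun p x => pvAddGo p PySem.Set.empty (x.headD [])) PySem.Dict.empty)

-- ===== PRECONDITION & SPEC =====
-- A raises IndexError when nodes is empty (pop from []) or when any node after the first is an
-- empty list (nodes[0][0] fails once that node reaches the front); B raises there as well.
def Pre_simplify_nodes_py (nodes : List (List (List Int))) : Prop :=
  nodes ≠ [] ∧ ∀ nd ∈ nodes.tail, nd ≠ []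
instance (nodes : List (List (List Int))) : Decidable (Pre_simplify_nodes_py nodes) := by
  unfold Pre_simplify_nodes_py; infer_instance
def pvWitness_simplify_nodes_py : List (List (List Int)) := [[[1, 2]], [[1, 3]], [[1]]]

def Spec_simplify_nodes_py (nodes : List (List (List Int))) (out : List (List (List Int))) : Prop := out = simplify_nodes_py_alt nodes
instance (nodes : List (List (List Int))) (out : List (List (List Int))) : Decidable (Spec_simplify_nodes_py nodes out) := by unfold Spec_simplify_nodes_py; infer_instance

-- ===== CLAIM (what is proved, stated in full; the proofs are below) =====
def Claim_equal_simplify_nodes_py : Prop := ∀ (nodes : List (List (List Int))), Dom_simplify_nodes_py nodes → Pre_simplify_nodes_py nodes → Spec_simplify_nodes_py nodes (simplify_nodes_py nodes)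

-- ===== LEMMAS AND PROOFS =====

-- number of condition lists in `heads` that contain c (as a Python int)
def pvCnt (c : Int) (heads : List (List Int)) : Int :=
  (heads.countP (fun h => h.contains c) : Int)

-- B's invariant: presence.get(c, 0) counts the remaining condition lists containing c
def pvInv (p : PySem.Dict Int Int) (heads : List (List Int)) : Prop :=
  ∀ c, p.getD c 0 = pvCnt c heads

theorem pvAddGo_getD (cs : List Int) (p : PySem.Dict Int Int) (seen : PySem.Set Int) (d : Int) :
    (pvAddGo p seen cs).getD d 0 =
      p.getD d 0 + (if d ∈ cs ∧ d ∉ seen then 1 else 0) := by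
  induction cs generalizing p seen with
  | nil => simp [pvAddGo]
  | cons c cs ih =>
    by_cases hc : c ∈ seen
    · rw [pvAddGo, if_pos ((PySem.Set.contains_iff seen c).mpr hc), ih]
      by_cases hd : d = c
      · subst hd; simp [hc]
      · simp [List.mem_cons, hd]
    · rw [pvAddGo, if_neg (by simpa [PySem.Set.contains_iff] using hc), ih,
        PySem.Dict.getD_insert]
      by_cases hd : d = c
      · subst hd
        simp [hc]
      · simp [PySem.Set.mem_add, List.mem_cons, hd]

theorem pvDecGo_getD (cs : List Int) (p : PySem.Dict Int Int) (seen : PySem.Set Int) (d : Int) :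
    (pvDecGo p seen cs).getD d 0 =
      p.getD d 0 - (if d ∈ cs ∧ d ∉ seen then 1 else 0) := by
  induction cs generalizing p seen with
  | nil => simp [pvDecGo]
  | cons c cs ih =>
    by_cases hc : c ∈ seen
    · rw [pvDecGo, if_pos ((PySem.Set.contains_iff seen c).mpr hc), ih]
      by_cases hd : d = c
      · subst hd; simp [hc]
      · simp [List.mem_cons, hd]
    · rw [pvDecGo, if_neg (by simpa [PySem.Set.contains_iff] using hc), ih,
        PySem.Dict.getD_insert]
      by_cases hd : d = c
      · subst hd
        simp [hc]
      · simp [PySem.Set.mem_add, List.mem_cons, hd]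

theorem pvInit_inv (nodes : List (List (List Int))) :
    pvInv (nodes.foldl (fun p x => pvAddGo p PySem.Set.empty (x.headD [])) PySem.Dict.empty)
      (nodes.map (fun nd => nd.headD [])) := by
  have main : ∀ (ns : List (List (List Int))) (p : PySem.Dict Int Int) (d : Int),
      (ns.foldl (fun p x => pvAddGo p PySem.Set.empty (x.headD [])) p).getD d 0 =
        p.getD d 0 + pvCnt d (ns.map (fun nd => nd.headD [])) := by
    intro ns
    induction ns with
    | nil => simp [pvCnt]
    | cons nd t ih =>
      intro p d
      rw [List.foldl_cons, ih, pvAddGo_getD]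
      simp only [pvCnt, List.map_cons, List.countP_cons, List.contains_iff_mem,
        PySem.Set.empty, List.not_mem_nil, not_false_iff, and_true]
      push_cast
      split_ifs <;> ring
  intro d
  rw [main]
  simp

theorem pvFire_fst (c : Int) (p : PySem.Dict Int Int) (rem : List (List (List Int))) :
    (pvFire c p rem).1 = rem.map (pvRemoveCond c) := by
  induction rem generalizing p with
  | nil => rfl
  | cons nd t ih => simp [pvFire, ih]

-- the condition list of a node after node[0].remove(c)
theorem pvHeadD_removeCond (c : Int) (nd : List (List Int)) :
    (pvRemoveCond c nd).headD [] = (PySem.List.remove? (nd.headD []) c).getD (nd.headD []) := by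
  cases nd with
  | nil => rfl
  | cons conds t => simp [pvRemoveCond]

-- removing (the first occurrence of) c does not affect membership of d ≠ c
theorem pvContains_remove_ne {d c : Int} (l : List Int) (h : d ≠ c) :
    ((PySem.List.remove? l c).getD l).contains d = l.contains d := by
  by_cases hc : c ∈ l
  · rw [PySem.List.remove?_eq_some_erase l c hc]
    simp [List.mem_erase_of_ne h]
  · rw [(PySem.List.remove?_eq_none_iff l c).mpr hc]
    rfl

theorem pvFire_getD (c : Int) (rem : List (List (List Int))) (p : PySem.Dict Int Int) (d : Int) :
    (pvFire c p rem).2.getD d 0 = p.getD d 0 -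
      (if d = c then
        ((rem.countP (fun nd => !(((pvRemoveCond c nd).headD []).contains c))) : Int)
       else 0) := by
  induction rem generalizing p with
  | nil => simp [pvFire]
  | cons nd t ih =>
    have hstep : (pvFire c p (nd :: t)).2 =
        (pvFire c (if ((pvRemoveCond c nd).headD []).contains c then p
                   else p.insert c (p.getD c 0 - 1)) t).2 := rfl
    rw [hstep, ih, List.countP_cons]
    by_cases hnd : c ∈ (pvRemoveCond c nd).headD []
    · have hnd' : c ∈ (pvRemoveCond c nd).head?.getD [] := by simpa using hnd
      rw [if_pos (List.contains_iff_mem.mpr hnd)]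
      simp [hnd']
    · have hnd' : c ∉ (pvRemoveCond c nd).head?.getD [] := by simpa using hnd
      rw [if_neg (by simpa [List.contains_iff_mem] using hnd), PySem.Dict.getD_insert]
      by_cases hd : d = c
      · subst hd
        simp [hnd']
        omega
      · simp [hd]

-- B's presence test agrees with A's all(...) under the invariant
theorem pvAllContain_iff (c : Int) (heads : List (List Int)) :
    pvAllContain c heads = true ↔ ∀ h ∈ heads, c ∈ h := by
  unfold pvAllContain
  simp only [List.all_eq_true, List.mem_range]
  constructor
  · intro H h hh
    obtain ⟨i, hi, rfl⟩ := List.mem_iff_getElem.mp hh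
    have := H i hi
    rwa [List.getD_eq_getElem heads [] hi, List.contains_iff_mem] at this
  · intro H i hi
    rw [List.getD_eq_getElem heads [] hi, List.contains_iff_mem]
    exact H _ (List.getElem_mem hi)

theorem pvCond_iff (c : Int) (heads : List (List Int)) (p : PySem.Dict Int Int)
    (hInv : pvInv p heads) :
    (p.getD c 0 = (heads.length : Int)) ↔ pvAllContain c heads = true := by
  rw [hInv c, pvAllContain_iff, pvCnt, Nat.cast_inj.symm.symm]
  constructor
  · intro h
    have hn : heads.countP (fun h => h.contains c) = heads.length := by exact_mod_cast h
    intro x hx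
    have := (List.countP_eq_length).mp hn x hx
    simpa [List.contains_iff_mem] using this
  · intro H
    have : heads.countP (fun h => h.contains c) = heads.length :=
      List.countP_eq_length.mpr (fun x hx => by simpa [List.contains_iff_mem] using H x hx)
    exact_mod_cast this

-- invariant preservation through one fired removal sweep (head node inline, tail via pvFire);
-- hall: the sweep only fires when every remaining condition list contains c
theorem pvInv_fire (c : Int) (conds : List Int) (rest : List (List (List Int)))
    (p : PySem.Dict Int Int)
    (hInv : pvInv p (conds :: rest.map (fun nd => nd.headD [])))
    (hall : ∀ h ∈ conds :: rest.map (fun nd => nd.headD []), c ∈ h) :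
    pvInv (pvFire c (if ((PySem.List.remove? conds c).getD conds).contains c then p
                     else p.insert c (p.getD c 0 - 1)) rest).2
      (((PySem.List.remove? conds c).getD conds) ::
        ((rest.map (pvRemoveCond c)).map (fun nd => nd.headD []))) := by
  intro d
  rw [pvFire_getD]
  have hc := hInv d
  simp only [pvCnt, List.countP_cons, List.countP_map, Function.comp_def] at hc ⊢
  by_cases hd : d = c
  · subst hd
    have hin : d ∈ conds := hall conds List.mem_cons_self
    have hrest : List.countP (fun nd => ((nd.headD [] : List Int)).contains d) rest =
        rest.length := by
      rw [List.countP_eq_length]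
      intro nd hnd
      exact List.contains_iff_mem.mpr
        (hall (nd.headD []) (List.mem_cons_of_mem _ (List.mem_map_of_mem hnd)))
    have hsplit := List.length_eq_countP_add_countP
      (fun nd => (((pvRemoveCond d nd).headD []).contains d)) (l := rest)
    have hsplit' : List.countP (fun nd => (((pvRemoveCond d nd).headD []).contains d)) rest +
        List.countP (fun nd => !(((pvRemoveCond d nd).headD []).contains d)) rest =
        rest.length := by
      simpa [decide_not] using hsplit.symm
    simp only [hin, if_true, List.contains_iff_mem] at hc
    rw [if_pos rfl]
    by_cases hhead : ((PySem.List.remove? conds d).getD conds).contains d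
    · rw [if_pos hhead]
      simp only [hhead, if_true]
      omega
    · rw [if_neg hhead, PySem.Dict.getD_insert, if_pos rfl]
      simp only [hhead, Bool.false_eq_true, if_false]
      omega
  · rw [if_neg hd]
    have hstep : ((if ((PySem.List.remove? conds c).getD conds).contains c then p
        else p.insert c (p.getD c 0 - 1)) : PySem.Dict Int Int).getD d 0 = p.getD d 0 := by
      split
      · rfl
      · rw [PySem.Dict.getD_insert, if_neg hd]
    have hhead : (((PySem.List.remove? conds c).getD conds).contains d) = (conds.contains d) :=
      pvContains_remove_ne _ hd
    have hcong : List.countP (fun nd => (((pvRemoveCond c nd).headD []).contains d)) rest =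
        List.countP (fun nd => ((nd.headD [] : List Int)).contains d) rest := by
      apply List.countP_congr
      intro nd _
      rw [pvHeadD_removeCond, pvContains_remove_ne _ hd]
    rw [hstep, hc, hhead, hcong]
    ring

-- the two inner condition loops run in lockstep
theorem pvLockstep (fuel : Nat) :
    ∀ (i : Nat) (conds : List Int) (rest : List (List (List Int))) (p : PySem.Dict Int Int),
      pvInv p (conds :: rest.map (fun nd => nd.headD [])) →
      (pvInnerB fuel i conds rest p).1 = (pvInnerA fuel i conds rest).1 ∧
      (pvInnerB fuel i conds rest p).2.1 = (pvInnerA fuel i conds rest).2 ∧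
      pvInv (pvInnerB fuel i conds rest p).2.2
        ((pvInnerA fuel i conds rest).1 ::
          ((pvInnerA fuel i conds rest).2.map (fun nd => nd.headD []))) := by
  induction fuel with
  | zero => exact fun i conds rest p hInv => ⟨rfl, rfl, hInv⟩
  | succ fuel ih =>
    intro i conds rest p hInv
    by_cases h : i < conds.length
    · by_cases hfire :
          pvAllContain (conds[i]'h) (conds :: rest.map (fun nd => nd.headD [])) = true
      · have hcond : p.getD (conds[i]'h) 0 = (rest.length : Int) + 1 := by
          have := (pvCond_iff (conds[i]'h) (conds :: rest.map (fun nd => nd.headD [])) p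
            hInv).mpr hfire
          simpa using this
        have hB : pvInnerB (fuel + 1) i conds rest p =
            pvInnerB fuel (i + 1) ((PySem.List.remove? conds (conds[i]'h)).getD conds)
              (rest.map (pvRemoveCond (conds[i]'h)))
              (pvFire (conds[i]'h)
                (if ((PySem.List.remove? conds (conds[i]'h)).getD conds).contains (conds[i]'h)
                 then p else p.insert (conds[i]'h) (p.getD (conds[i]'h) 0 - 1)) rest).2 := by
          rw [pvInnerB, dif_pos h, if_pos hcond, pvFire_fst]
        have hA : pvInnerA (fuel + 1) i conds rest =
            pvInnerA fuel (i + 1) ((PySem.List.remove? conds (conds[i]'h)).getD conds)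
              (rest.map (pvRemoveCond (conds[i]'h))) := by
          rw [pvInnerA, dif_pos h, if_pos hfire]
        rw [hB, hA]
        refine ih _ _ _ _ (pvInv_fire (conds[i]'h) conds rest p hInv ?_)
        exact fun hh hmem => (pvAllContain_iff (conds[i]'h) _).mp hfire hh hmem
      · have hcond : ¬ (p.getD (conds[i]'h) 0 = (rest.length : Int) + 1) := by
          intro hx
          exact hfire ((pvCond_iff (conds[i]'h) (conds :: rest.map (fun nd => nd.headD [])) p
            hInv).mp (by simpa using hx))
        have hB : pvInnerB (fuel + 1) i conds rest p = pvInnerB fuel (i + 1) conds rest p := by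
          rw [pvInnerB, dif_pos h, if_neg hcond]
        have hA : pvInnerA (fuel + 1) i conds rest = pvInnerA fuel (i + 1) conds rest := by
          rw [pvInnerA, dif_pos h, if_neg hfire]
        rw [hB, hA]
        exact ih _ _ _ _ hInv
    · rw [pvInnerA, pvInnerB, dif_neg h, dif_neg h]
      exact ⟨rfl, rfl, hInv⟩

-- the two outer while loops run in lockstep
theorem pvOuter_eq (fuel : Nat) :
    ∀ (rem : List (List (List Int))) (p : PySem.Dict Int Int),
      pvInv p (rem.map (fun nd => nd.headD [])) → pvOuterB fuel rem p = pvOuterA fuel rem := by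
  induction fuel with
  | zero => intro rem p _; rfl
  | succ fuel ih =>
    intro rem p hInv
    match rem with
    | [] => rfl
    | nd :: rest =>
      have hInv' : pvInv p (nd.headD [] :: rest.map (fun nd => nd.headD [])) := hInv
      obtain ⟨h1, h2, h3⟩ :=
        pvLockstep (nd.headD []).length 0 (nd.headD []) rest p hInv'
      rw [pvOuterA, pvOuterB, h1, h2]
      congr 1
      apply ih
      intro d
      rw [pvDecGo_getD, h3 d]
      simp only [pvCnt, List.countP_cons, List.contains_iff_mem, PySem.Set.empty,
        List.not_mem_nil, not_false_iff, and_true]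
      split_ifs <;> push_cast <;> ring

theorem simplify_nodes_py_spec : Claim_equal_simplify_nodes_py := by
  unfold Claim_equal_simplify_nodes_py
  intro nodes _ hpre
  unfold Spec_simplify_nodes_py
  match nodes with
  | [] => exact absurd rfl hpre.1
  | nd :: rest =>
    simp only [simplify_nodes_py, simplify_nodes_py_alt]
    rw [pvOuter_eq rest.length rest _ (pvInit_inv rest)]
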